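-- pv_equiv track=rewrite | github.com/kelvinlin9614/CS3650_Project7 | main.py | clear_format
-- ===== SOURCE A (Python) =====
-- def clear_format(line):
--     line = [x.split('/')[0] for x in line]
--     line = [x.replace('\r', '') for x in line]
--     line = [x.replace('\t', '') for x in line]
--     line = [x.replace('\n', '') for x in line]
--     while '' in line:
--         line.remove('')
--     return line
-- ===== SOURCE B (Python) =====
-- def clear_format(line):
--     result = []
--     for x in line:
--         t = x.split('/')[0].replace('\r', '').replace('\t', '').replace('\n', '')
--         if t != '':
--             result.append(t)
--     return result
-- ===== Notes on version B (the rewrite author's own statement) =====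
-- stated objective: simpler
-- what changed: Replaces four sequential full-list comprehension passes plus a repeated 'in'/remove scan for empties with one single-pass loop that cleans each element and filters empties inline.
import Mathlib
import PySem

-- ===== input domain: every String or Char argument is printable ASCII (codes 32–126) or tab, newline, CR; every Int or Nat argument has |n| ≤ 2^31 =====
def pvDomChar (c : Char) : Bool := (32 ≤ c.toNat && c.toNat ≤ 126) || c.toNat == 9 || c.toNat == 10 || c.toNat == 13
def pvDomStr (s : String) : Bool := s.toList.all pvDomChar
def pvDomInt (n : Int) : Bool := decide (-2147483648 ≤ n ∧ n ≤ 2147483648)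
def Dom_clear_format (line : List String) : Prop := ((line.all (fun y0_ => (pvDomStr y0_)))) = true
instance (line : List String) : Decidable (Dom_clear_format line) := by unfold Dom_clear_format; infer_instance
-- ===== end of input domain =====

-- B fuses A's four full-list passes and the repeated-remove scan for empties into one
-- transform-and-filter traversal; return values proved equal on all inputs.

-- ===== PORT A =====
-- x.split('/')[0]  (split with a nonempty separator always yields at least one piece, so [0] never raises)
def pvSplitHead (x : String) : String :=
  (PySem.List.pyGet? ((PySem.Str.split? x "/").getD []) 0).getD ""

-- line.remove('') : remove the FIRST occurrence of ''
def pvRemoveFirstEmpty : List String → List String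
  | [] => []
  | x :: xs => if x = "" then xs else x :: pvRemoveFirstEmpty xs

theorem pvRemoveFirstEmpty_length_lt (l : List String) (h : "" ∈ l) :
    (pvRemoveFirstEmpty l).length < l.length := by
  induction l with
  | nil => cases h
  | cons x xs ih =>
    by_cases hx : x = ""
    · simp [pvRemoveFirstEmpty, hx]
    · have hm : "" ∈ xs := by
        rcases List.mem_cons.1 h with h1 | h1
        · exact absurd h1.symm hx
        · exact h1
      simpa [pvRemoveFirstEmpty, hx] using Nat.succ_lt_succ (ih hm)

-- while '' in line: line.remove('')
def pvRemoveLoop (l : List String) : List String :=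
  if h : "" ∈ l then pvRemoveLoop (pvRemoveFirstEmpty l) else l
termination_by l.length
decreasing_by exact pvRemoveFirstEmpty_length_lt l h

def clear_format (line : List String) : List String :=
  let l1 := line.map (fun x => pvSplitHead x)
  let l2 := l1.map (fun x => PySem.Str.replace x "\r" "")
  let l3 := l2.map (fun x => PySem.Str.replace x "\t" "")
  let l4 := l3.map (fun x => PySem.Str.replace x "\n" "")
  pvRemoveLoop l4

-- ===== PORT B =====
-- one pass: clean each element, append to the result only when nonempty
def clear_format_alt : List String → List String
  | [] => []
  | x :: xs =>
    let t := PySem.Str.replace (PySem.Str.replace (PySem.Str.replace (pvSplitHead x) "\r" "") "\t" "") "\n" ""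
    if t ≠ "" then t :: clear_format_alt xs else clear_format_alt xs

-- ===== PRECONDITION & SPEC =====
def Spec_clear_format (line : List String) (out : List String) : Prop := out = clear_format_alt line
instance (line : List String) (out : List String) : Decidable (Spec_clear_format line out) := by unfold Spec_clear_format; infer_instance

-- ===== CLAIM (what is proved, stated in full; the proofs are below) =====
def Claim_equal_clear_format : Prop := ∀ (line : List String), Dom_clear_format line → Spec_clear_format line (clear_format line)

-- ===== LEMMAS AND PROOFS =====
theorem filter_pvRemoveFirstEmpty (l : List String) :
    (pvRemoveFirstEmpty l).filter (fun s => s ≠ "") = l.filter (fun s => s ≠ "") := by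
  induction l with
  | nil => rfl
  | cons x xs ih =>
    by_cases hx : x = ""
    · simp [pvRemoveFirstEmpty, hx]
    · rw [show pvRemoveFirstEmpty (x :: xs) = x :: pvRemoveFirstEmpty xs from by
          simp [pvRemoveFirstEmpty, hx],
        List.filter_cons, List.filter_cons, ih]

theorem pvRemoveLoop_eq_filter (l : List String) :
    pvRemoveLoop l = l.filter (fun s => s ≠ "") := by
  by_cases h : "" ∈ l
  · rw [pvRemoveLoop, dif_pos h, pvRemoveLoop_eq_filter (pvRemoveFirstEmpty l),
      filter_pvRemoveFirstEmpty]
  · rw [pvRemoveLoop, dif_neg h, List.filter_eq_self.2]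
    intro a ha
    simp only [decide_eq_true_eq]
    intro hae
    exact h (hae ▸ ha)
termination_by l.length
decreasing_by exact pvRemoveFirstEmpty_length_lt l h

theorem clear_format_alt_eq_filter_map (line : List String) :
    clear_format_alt line =
      (line.map (fun x => PySem.Str.replace (PySem.Str.replace (PySem.Str.replace
        (pvSplitHead x) "\r" "") "\t" "") "\n" "")).filter (fun s => s ≠ "") := by
  induction line with
  | nil => rfl
  | cons x xs ih =>
    simp only [clear_format_alt, List.map_cons, List.filter_cons, ih]
    by_cases ht : PySem.Str.replace (PySem.Str.replace (PySem.Str.replace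
        (pvSplitHead x) "\r" "") "\t" "") "\n" "" = ""
    · simp [ht]
    · simp [ht]

-- ===== VERDICT (by name: the statement is the Claim_ definition above) =====
theorem clear_format_spec : Claim_equal_clear_format := by
  intro line _
  unfold Spec_clear_format clear_format
  rw [pvRemoveLoop_eq_filter, clear_format_alt_eq_filter_map]
  simp [List.map_map, Function.comp_def]
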